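-- pv_equiv track=rewrite | github.com/naugsco/Dashboards | backend/server.py | enforce_source_diversity
-- ===== SOURCE A (Python) =====
-- def enforce_source_diversity(stories: list, max_per_source: int = 0) -> list:
--     if not stories:
--         return stories
--     total = len(stories)
--     num_sources = len(set(s.get("source", "") for s in stories))
--     if num_sources == 0:
--         return stories
--     max_per_source = max(total // num_sources + 2, 5)
--     source_counts = {}
--     result = []
--     for story in stories:
--         src = story.get("source", "Unknown")
--         current = source_counts.get(src, 0)
--         if current < max_per_source:
--             result.append(story)
--             source_counts[src] = current + 1
--     return result
-- ===== SOURCE B (Python) =====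
-- def enforce_source_diversity(stories: list, max_per_source: int = 0) -> list:
--     if not stories:
--         return stories
--     num_sources = len({s.get("source", "") for s in stories})
--     max_per_source = max(len(stories) // num_sources + 2, 5)
--     groups = {}
--     for i, story in enumerate(stories):
--         groups.setdefault(story.get("source", "Unknown"), []).append(i)
--     keep = {i for idxs in groups.values() for i in idxs[:max_per_source]}
--     return [story for i, story in enumerate(stories) if i in keep]
-- ===== Notes on version B (the rewrite author's own statement) =====
-- stated objective: alternative
-- what changed: Replaces A's single stateful pass (per-source running counter deciding each story as it is met) with a staged grouping strategy: one pass builds an index table mapping each source to its list of positions, the first max_per_source positions of every group form a keep-set, and a final pass filters the stories by index membership.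
import Mathlib
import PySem

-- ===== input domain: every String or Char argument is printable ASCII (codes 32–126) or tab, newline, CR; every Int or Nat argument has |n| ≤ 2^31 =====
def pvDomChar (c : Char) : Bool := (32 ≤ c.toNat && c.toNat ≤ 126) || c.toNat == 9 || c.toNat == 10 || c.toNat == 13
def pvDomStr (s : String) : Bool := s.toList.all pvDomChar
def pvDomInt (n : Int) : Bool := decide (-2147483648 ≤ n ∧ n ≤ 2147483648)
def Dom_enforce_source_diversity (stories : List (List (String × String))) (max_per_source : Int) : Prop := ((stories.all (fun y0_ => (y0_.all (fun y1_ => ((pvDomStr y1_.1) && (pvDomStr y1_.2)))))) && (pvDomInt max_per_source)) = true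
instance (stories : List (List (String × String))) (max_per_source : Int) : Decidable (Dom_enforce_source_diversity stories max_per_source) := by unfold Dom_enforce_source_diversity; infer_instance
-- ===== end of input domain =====

-- B replaces A's stateful single pass (running per-source counter) with staged passes: group indices
-- by source into a table, slice each group's first max_per_source indices into a keep-set, filter by index.

-- ===== PORT A =====
-- story.get(key, dflt) on the association-list dict (first match)
def pvGetStory (s : List (String × String)) (k dflt : String) : String :=
  (PySem.Dict.mk s).getD k dflt

def enforce_source_diversity (stories : List (List (String × String))) (max_per_source : Int) : List (List (String × String)) :=
  if stories = [] then stories else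
  let total : Int := stories.length
  let num_sources : Int := (PySem.Set.ofList (stories.map (fun s => pvGetStory s "source" ""))).length
  if num_sources = 0 then stories else
  let mps : Int := max (PySem.Int.floordiv total num_sources + 2) 5
  (stories.foldl (fun (acc : PySem.Dict String Int × List (List (String × String))) story =>
      let src := pvGetStory story "source" "Unknown"
      let current := acc.1.getD src 0
      if current < mps then (acc.1.insert src (current + 1), acc.2 ++ [story])
      else acc)
    (PySem.Dict.empty, [])).2

-- ===== PORT B =====
-- story.get("source", "Unknown")
def pvSrc (s : List (String × String)) : String := pvGetStory s "source" "Unknown"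

def enforce_source_diversity_alt (stories : List (List (String × String))) (max_per_source : Int) : List (List (String × String)) :=
  if stories = [] then stories else
  let num_sources : Int := (PySem.Set.ofList (stories.map (fun s => pvGetStory s "source" ""))).length
  let m : Int := max (PySem.Int.floordiv (stories.length : Int) num_sources + 2) 5
  -- groups.setdefault(src, []).append(i)  ==  groups[src] = groups.get(src, []) + [i], i.e. Dict.modify
  let groups : PySem.Dict String (List Int) :=
    (PySem.List.enumerate stories 0).foldl
      (fun d p => d.modify (pvSrc p.2) [] (fun l => l ++ [p.1])) PySem.Dict.empty
  let keep : PySem.Set Int :=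
    PySem.Set.ofList ((groups.values.map (fun idxs => PySem.List.slice idxs none (some m))).flatten)
  (PySem.List.enumerate stories 0).filterMap (fun p => if p.1 ∈ keep then some p.2 else none)

-- ===== PRECONDITION & SPEC =====
def Spec_enforce_source_diversity (stories : List (List (String × String))) (max_per_source : Int) (out : List (List (String × String))) : Prop := out = enforce_source_diversity_alt stories max_per_source
instance (stories : List (List (String × String))) (max_per_source : Int) (out : List (List (String × String))) : Decidable (Spec_enforce_source_diversity stories max_per_source out) := by unfold Spec_enforce_source_diversity; infer_instance

-- ===== CLAIM (what is proved, stated in full; the proofs are below) =====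
def Claim_equal_enforce_source_diversity : Prop := ∀ (stories : List (List (String × String))) (max_per_source : Int), Dom_enforce_source_diversity stories max_per_source → Spec_enforce_source_diversity stories max_per_source (enforce_source_diversity stories max_per_source)

-- ===== LEMMAS AND PROOFS =====

-- common reference: keep a story iff its source was seen < m times before it
def pvKeep (m : Int) (pre : List String) : List (List (String × String)) → List (List (String × String))
  | [] => []
  | s :: rest =>
    if ((pre.count (pvSrc s) : Nat) : Int) < m then s :: pvKeep m (pre ++ [pvSrc s]) rest
    else pvKeep m (pre ++ [pvSrc s]) rest

theorem pvLoopA (m : Int) (rest : List (List (String × String))) :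
    ∀ (d : PySem.Dict String Int) (res : List (List (String × String))) (pre : List String),
    (∀ k, d.getD k 0 = min m ((pre.count k : Nat) : Int)) →
    (rest.foldl (fun (acc : PySem.Dict String Int × List (List (String × String))) story =>
      let src := pvGetStory story "source" "Unknown"
      let current := acc.1.getD src 0
      if current < m then (acc.1.insert src (current + 1), acc.2 ++ [story])
      else acc) (d, res)).2 = res ++ pvKeep m pre rest := by
  induction rest with
  | nil => intro d res pre _; simp [pvKeep]
  | cons s rest ih =>
    intro d res pre hinv
    have hc := hinv (pvSrc s)
    have hcount : ∀ k, ((pre ++ [pvSrc s]).count k : Int) =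
        (pre.count k : Int) + (if k = pvSrc s then 1 else 0) := by
      intro k
      rw [List.count_append]
      by_cases hk : k = pvSrc s
      · subst hk; simp
      · have : [pvSrc s].count k = 0 := by
          simp only [List.count_singleton]
          simp [beq_iff_eq]
          exact fun h' => hk h'.symm
        simp [this, hk]
    by_cases h : ((pre.count (pvSrc s) : Nat) : Int) < m
    · have hlt : d.getD (pvGetStory s "source" "Unknown") 0 < m := by
        show d.getD (pvSrc s) 0 < m; omega
      simp only [List.foldl_cons, if_pos hlt]
      rw [ih _ _ (pre ++ [pvSrc s]) ?_]
      · simp only [pvKeep, if_pos h, List.append_assoc, List.singleton_append]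
      · intro k
        rw [PySem.Dict.getD_insert, hcount k]
        by_cases hk : k = pvGetStory s "source" "Unknown"
        · have hk' : k = pvSrc s := hk
          rw [if_pos hk, if_pos hk', hk']
          show d.getD (pvSrc s) 0 + 1 = _
          omega
        · have hk' : ¬ k = pvSrc s := hk
          rw [if_neg hk, if_neg hk', hinv k]
          omega
    · have hge : ¬ d.getD (pvGetStory s "source" "Unknown") 0 < m := by
        show ¬ d.getD (pvSrc s) 0 < m; omega
      simp only [List.foldl_cons, if_neg hge]
      rw [ih d res (pre ++ [pvSrc s]) ?_]
      · simp only [pvKeep, if_neg h]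
      · intro k
        rw [hinv k, hcount k]
        by_cases hk : k = pvSrc s
        · rw [if_pos hk, hk]; omega
        · rw [if_neg hk]; omega

theorem pvLoopB (m : Int) (srcs : List String) (rest : List (List (String × String))) :
    ∀ (k : Nat) (pre : List String),
    srcs = pre ++ rest.map pvSrc → pre.length = k →
    (PySem.List.enumerate rest (k : Int)).filterMap (fun p =>
        if ((List.count (PySem.List.pyGetD srcs p.1 "") (PySem.List.slice srcs none (some p.1)) : Nat) : Int) < m
        then some p.2 else none) = pvKeep m pre rest := by
  induction rest with
  | nil => intro k pre _ _; simp [PySem.List.enumerate_nil, pvKeep]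
  | cons s rest ih =>
    intro k pre hsrcs hlen
    have hslice : PySem.List.slice srcs none (some (k : Int)) = pre := by
      rw [PySem.List.slice_to_natCast, hsrcs, ← hlen, List.take_left]
    have hget : PySem.List.pyGetD srcs (k : Int) "" = pvSrc s := by
      rw [PySem.List.pyGetD_natCast, hsrcs, ← hlen]
      simp [List.getD_eq_getElem?_getD]
    rw [PySem.List.enumerate_cons, List.filterMap_cons]
    have hnext : (k : Int) + 1 = ((k + 1 : Nat) : Int) := by push_cast; ring
    have hrec : (PySem.List.enumerate rest ((k : Int) + 1)).filterMap (fun p =>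
        if ((List.count (PySem.List.pyGetD srcs p.1 "") (PySem.List.slice srcs none (some p.1)) : Nat) : Int) < m
        then some p.2 else none) = pvKeep m (pre ++ [pvSrc s]) rest := by
      rw [hnext]
      exact ih (k + 1) (pre ++ [pvSrc s]) (by simpa using hsrcs) (by simp [hlen])
    by_cases h : ((pre.count (pvSrc s) : Nat) : Int) < m
    · simp only [hslice, hget, if_pos h, pvKeep]
      rw [hrec]
    · simp only [hslice, hget, if_neg h, pvKeep]
      rw [hrec]

-- B-side machinery: the positions of source c in a source list, starting at offset j
def pvOcc : List String → Int → String → List Int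
  | [], _, _ => []
  | x :: xs, j, c => if x = c then j :: pvOcc xs (j + 1) c else pvOcc xs (j + 1) c

theorem pvOcc_bridge (c : String) : ∀ (xs : List (List (String × String))) (j : Int),
    List.map (fun x => x.2)
      (List.filter (fun p => p.1 == c) ((PySem.List.enumerate xs j).map (fun p => (pvSrc p.2, p.1))))
    = pvOcc (xs.map pvSrc) j c := by
  intro xs
  induction xs with
  | nil => intro j; simp [PySem.List.enumerate_nil, pvOcc]
  | cons s rest ih =>
    intro j
    rw [PySem.List.enumerate_cons]
    by_cases h : pvSrc s = c <;>
      simp [pvOcc, h, ih (j + 1)]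

theorem pvOcc_append (c : String) : ∀ (a b : List String) (j : Int),
    pvOcc (a ++ b) j c = pvOcc a j c ++ pvOcc b (j + a.length) c := by
  intro a
  induction a with
  | nil => intro b j; simp [pvOcc]
  | cons x xs ih =>
    intro b j
    have harith : (j + 1) + (xs.length : Int) = j + ((xs.length : Int) + 1) := by ring
    by_cases h : x = c <;>
      simp [pvOcc, h, ih b (j + 1), harith]

theorem pvOcc_length (c : String) : ∀ (l : List String) (j : Int),
    (pvOcc l j c).length = l.count c := by
  intro l
  induction l with
  | nil => intro j; simp [pvOcc]
  | cons x xs ih =>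
    intro j
    by_cases h : x = c <;>
      simp [pvOcc, h, ih (j + 1)]

theorem pvOcc_bounds (c : String) : ∀ (l : List String) (j x : Int),
    x ∈ pvOcc l j c → j ≤ x ∧ x < j + l.length := by
  intro l
  induction l with
  | nil => intro j x hx; simp [pvOcc] at hx
  | cons y ys ih =>
    intro j x hx
    simp only [pvOcc] at hx
    by_cases h : y = c
    · rw [if_pos h] at hx
      rcases List.mem_cons.1 hx with rfl | hx'
      · simp only [List.length_cons]; push_cast; omega
      · have := ih (j + 1) x hx'
        simp at this ⊢; omega
    · rw [if_neg h] at hx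
      have := ih (j + 1) x hx
      simp at this ⊢; omega

theorem pvOcc_mem_src : ∀ (l : List String) (j x : Int) (c : String),
    x ∈ pvOcc l j c → ∃ (t : Nat), ∃ (h : t < l.length), x = j + t ∧ l[t] = c := by
  intro l
  induction l with
  | nil => intro j x c hx; simp [pvOcc] at hx
  | cons y ys ih =>
    intro j x c hx
    simp only [pvOcc] at hx
    by_cases h : y = c
    · rw [if_pos h] at hx
      rcases List.mem_cons.1 hx with rfl | hx'
      · exact ⟨0, by simp, by simp, by simpa using h⟩
      · obtain ⟨t, ht, hxe, hc⟩ := ih (j + 1) x c hx'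
        exact ⟨t + 1, by simpa using ht, by push_cast; omega, by simpa using hc⟩
    · rw [if_neg h] at hx
      obtain ⟨t, ht, hxe, hc⟩ := ih (j + 1) x c hx
      exact ⟨t + 1, by simpa using ht, by push_cast; omega, by simpa using hc⟩

theorem pvOcc_take_mem (l : List String) (k : Nat) (hk : k < l.length) (m' : Nat) :
    ((k : Int) ∈ (pvOcc l 0 (l[k])).take m') ↔ (l.take k).count l[k] < m' := by
  set c := l[k] with hc
  have hlt : (l.take k).length = k := by simp; omega
  have hsplit : l.take k ++ c :: l.drop (k + 1) = l := by
    rw [hc, List.getElem_cons_drop hk, List.take_append_drop]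
  have hA : ∀ x ∈ pvOcc (l.take k) 0 c, x < (k : Int) := by
    intro x hx
    have := pvOcc_bounds c (l.take k) 0 x hx
    rw [hlt] at this; omega
  conv_lhs => rw [← hsplit]
  rw [pvOcc_append, hlt, zero_add,
    show pvOcc (c :: l.drop (k + 1)) (k : Int) c = (k : Int) :: pvOcc (l.drop (k + 1)) ((k : Int) + 1) c
      from by simp [pvOcc]]
  set A := pvOcc (l.take k) 0 c with hAdef
  set B := pvOcc (l.drop (k + 1)) ((k : Int) + 1) c with hBdef
  have hlenA : A.length = (l.take k).count c := pvOcc_length c (l.take k) 0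
  rw [List.take_append, List.mem_append]
  have hnA : ¬ ((k : Int) ∈ A.take m') := by
    intro hx
    exact absurd (hA _ (List.mem_of_mem_take hx)) (by omega)
  have hiff : ((k : Int) ∈ ((k : Int) :: B).take (m' - A.length)) ↔ A.length < m' := by
    constructor
    · intro hmem
      by_contra hml
      have h0 : m' - A.length = 0 := by omega
      rw [h0, List.take_zero] at hmem
      simp at hmem
    · intro h
      rcases Nat.exists_eq_succ_of_ne_zero (show m' - A.length ≠ 0 by omega) with ⟨t, ht⟩
      rw [ht, List.take_succ_cons]
      exact List.mem_cons_self
  simp only [hnA, false_or]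
  rw [hiff, hlenA]

theorem pvGroups_getD (stories : List (List (String × String))) (c : String) :
    (((PySem.List.enumerate stories 0).foldl
        (fun d p => d.modify (pvSrc p.2) [] (fun l => l ++ [p.1])) PySem.Dict.empty).getD c [])
    = pvOcc (stories.map pvSrc) 0 c := by
  have h := PySem.Dict.getD_foldl_modify_append
      ((PySem.List.enumerate stories 0).map (fun p => (pvSrc p.2, p.1))) PySem.Dict.empty c
  rw [List.foldl_map] at h
  simpa [pvOcc_bridge] using h

theorem pvMapSrc_enumerate (stories : List (List (String × String))) :
    (PySem.List.enumerate stories 0).map (fun p => pvSrc p.2) = stories.map pvSrc := by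
  calc (PySem.List.enumerate stories 0).map (fun p => pvSrc p.2)
      = ((PySem.List.enumerate stories 0).map (fun p => p.2)).map pvSrc := by
        rw [List.map_map]; rfl
    _ = stories.map pvSrc := by rw [PySem.List.map_snd_enumerate]

theorem pvGroups_keys (stories : List (List (String × String))) :
    ((PySem.List.enumerate stories 0).foldl
        (fun d p => d.modify (pvSrc p.2) [] (fun l => l ++ [p.1])) PySem.Dict.empty).keys
    = PySem.Set.ofList (stories.map pvSrc) := by
  have h := PySem.Dict.keys_foldl_modify_key (PySem.List.enumerate stories 0)
      (fun p => pvSrc p.2) ([] : List Int) (fun _ p l => l ++ [p.1]) PySem.Dict.empty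
  simp only [PySem.Dict.keys_empty, PySem.Set.update_nil_left, pvMapSrc_enumerate] at h
  exact h

theorem pvGroups_nodup (stories : List (List (String × String))) :
    ((PySem.List.enumerate stories 0).foldl
        (fun d p => d.modify (pvSrc p.2) [] (fun l => l ++ [p.1])) PySem.Dict.empty).keys.Nodup := by
  have h := PySem.Dict.nodup_keys_foldl_modify_key (PySem.List.enumerate stories 0)
      (fun p => pvSrc p.2) ([] : List Int) (fun _ p l => l ++ [p.1]) PySem.Dict.empty
      (by simp [PySem.Dict.keys_empty])
  exact h

theorem pvMemKeep (stories : List (List (String × String))) (m : Int) (hm : 0 ≤ m)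
    (k : Nat) (hk : k < stories.length) :
    ((k : Int) ∈ PySem.Set.ofList
        (((((PySem.List.enumerate stories 0).foldl
            (fun d p => d.modify (pvSrc p.2) [] (fun l => l ++ [p.1])) PySem.Dict.empty).values.map
          (fun idxs => PySem.List.slice idxs none (some m)))).flatten))
    ↔ ((List.count ((stories.map pvSrc)[k]'(by simpa using hk)) ((stories.map pvSrc).take k) : Nat) : Int) < m := by
  set G := (PySem.List.enumerate stories 0).foldl
      (fun d p => d.modify (pvSrc p.2) [] (fun l => l ++ [p.1])) PySem.Dict.empty with hG
  have hk' : k < (stories.map pvSrc).length := by simpa using hk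
  rw [PySem.Set.mem_ofList, List.mem_flatten]
  rw [PySem.Dict.values_eq_map_keys G (pvGroups_nodup stories) []]
  constructor
  · rintro ⟨L, hL, hmem⟩
    rcases List.mem_map.1 hL with ⟨L', hL', rfl⟩
    rcases List.mem_map.1 hL' with ⟨c, _, rfl⟩
    rw [hG, pvGroups_getD stories c, PySem.List.slice_to _ hm] at hmem
    have hsrc := pvOcc_mem_src (stories.map pvSrc) 0 (k : Int) c (List.mem_of_mem_take hmem)
    obtain ⟨t, ht, hte, hc⟩ := hsrc
    have htk : t = k := by omega
    subst htk
    rw [← hc] at hmem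
    have := (pvOcc_take_mem (stories.map pvSrc) t hk' m.toNat).1 hmem
    omega
  · intro hcount
    refine ⟨PySem.List.slice (G.getD ((stories.map pvSrc)[k]'hk') []) none (some m), ?_, ?_⟩
    · refine List.mem_map.2 ⟨G.getD ((stories.map pvSrc)[k]'hk') [], ?_, rfl⟩
      refine List.mem_map.2 ⟨(stories.map pvSrc)[k]'hk', ?_, rfl⟩
      rw [pvGroups_keys stories, PySem.Set.mem_ofList]
      exact List.getElem_mem hk'
    · rw [hG, pvGroups_getD stories _, PySem.List.slice_to _ hm]
      exact (pvOcc_take_mem (stories.map pvSrc) k hk' m.toNat).2 (by omega)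

-- ===== VERDICT (by name: the statement is the Claim_ definition above) =====
theorem enforce_source_diversity_spec : Claim_equal_enforce_source_diversity := by
  intro stories max_per_source _
  unfold Spec_enforce_source_diversity
  by_cases hnil : stories = []
  · simp [enforce_source_diversity, enforce_source_diversity_alt, hnil]
  · have hne : (PySem.Set.ofList (stories.map (fun s => pvGetStory s "source" ""))).length ≠ 0 := by
      intro h
      apply hnil
      have hmapnil : stories.map (fun s => pvGetStory s "source" "") = [] := by
        by_contra hm
        obtain ⟨x, hx⟩ := List.exists_mem_of_ne_nil _ hm
        have hxm : x ∈ PySem.Set.ofList (stories.map (fun s => pvGetStory s "source" "")) :=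
          (PySem.Set.mem_ofList _ _).2 hx
        rw [List.length_eq_zero_iff.1 h] at hxm
        exact absurd hxm (List.not_mem_nil)
      exact List.map_eq_nil_iff.1 hmapnil
    have hnz : ((PySem.Set.ofList (stories.map (fun s => pvGetStory s "source" ""))).length : Int) ≠ 0 := by
      exact_mod_cast hne
    simp only [enforce_source_diversity, enforce_source_diversity_alt, if_neg hnil, if_neg hnz]
    set m : Int := max (PySem.Int.floordiv (stories.length : Int)
      ((PySem.Set.ofList (stories.map (fun s => pvGetStory s "source" ""))).length : Int) + 2) 5 with hm
    have h0m : (0 : Int) ≤ m := le_trans (by norm_num) (le_max_right _ 5)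
    rw [pvLoopA m stories PySem.Dict.empty [] []
      (fun k => by simp [PySem.Dict.getD_empty]; omega)]
    rw [List.nil_append]
    rw [← pvLoopB m (stories.map pvSrc) stories 0 [] (by simp) rfl]
    simp only [Nat.cast_zero]
    refine List.filterMap_congr ?_
    intro p hp
    rcases (PySem.List.mem_enumerate_iff _ _ _).1 hp with ⟨j, hj, rfl⟩
    simp only [zero_add]
    have hget : PySem.List.pyGetD (stories.map pvSrc) (j : Int) "" = (stories.map pvSrc)[j]'(by simpa using hj) := by
      rw [PySem.List.pyGetD_natCast]
      simp [List.getD_eq_getElem?_getD, List.getElem?_eq_getElem (by simpa using hj)]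
    have hslice : PySem.List.slice (stories.map pvSrc) none (some (j : Int)) = (stories.map pvSrc).take j :=
      PySem.List.slice_to_natCast _ _
    rw [hget, hslice]
    exact (if_congr ((pvMemKeep stories m h0m j hj).symm) rfl rfl)
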